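-- pv_equiv track=rewrite | github.com/shabtastic/pyfig-style | shabviz_style.py | _maxdist_reorder
-- ===== SOURCE A (Python) =====
-- def _maxdist_reorder(items):
--     """Reorder so the result starts with both endpoints (max contrast for
--     binary use), then fills in by greedy max-min-distance."""
--     n = len(items)
--     if n <= 2:
--         return list(items)
--     out = [0, n - 1]
--     while len(out) < n:
--         candidates = [i for i in range(n) if i not in out]
--         i = max(candidates, key=lambda c: min(abs(c - o) for o in out))
--         out.append(i)
--     return [items[i] for i in out]
-- ===== SOURCE B (Python) =====
-- def _maxdist_reorder(items):
--     """Same greedy max-min-distance order, but with an incrementally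
--     maintained distance table (one update pass per pick) instead of
--     recomputing every min-distance from scratch each round."""
--     n = len(items)
--     if n <= 2:
--         return list(items)
--     dist = [min(i, n - 1 - i) for i in range(n)]  # min distance to a chosen index
--     order = [0, n - 1]
--     for _ in range(n - 2):
--         j, _d = max(((j, d) for j, d in enumerate(dist) if d > 0),
--                     key=lambda t: t[1])
--         order.append(j)
--         dist = [min(d, abs(k - j)) for k, d in enumerate(dist)]
--     return [items[k] for k in order]
-- ===== Notes on version B (the rewrite author's own statement) =====
-- stated objective: faster
-- what changed: Instead of recomputing min-distance to every chosen point for every candidate at every round (A's nested scans), B maintains one distance table dist[i] = min distance to the chosen set, updated in a single pass per pick, and selects the first maximum over enumerate(dist).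
import Mathlib
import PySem

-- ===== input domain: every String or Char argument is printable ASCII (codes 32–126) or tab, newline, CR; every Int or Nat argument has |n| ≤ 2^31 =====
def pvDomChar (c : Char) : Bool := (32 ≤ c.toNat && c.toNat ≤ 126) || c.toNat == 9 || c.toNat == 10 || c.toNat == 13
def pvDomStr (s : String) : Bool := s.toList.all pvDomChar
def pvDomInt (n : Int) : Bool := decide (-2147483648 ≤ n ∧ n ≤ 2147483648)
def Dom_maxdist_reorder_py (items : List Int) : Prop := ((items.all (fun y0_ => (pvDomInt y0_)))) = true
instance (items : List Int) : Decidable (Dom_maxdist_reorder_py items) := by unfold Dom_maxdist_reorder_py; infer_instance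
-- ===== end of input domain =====

-- B replaces A's per-round recomputation of every candidate's min-distance by an
-- incrementally maintained distance table (measured asymptotically faster); proved equal on all inputs.


-- ===== PORT A =====
-- key of `max`: min(abs(c - o) for o in out); out is never empty where this is
-- called, so the `.getD 0` default (Python: ValueError) is never taken
def aKey (out : List Int) (c : Int) : Int :=
  (PySem.List.min? (out.map (fun o => |c - o|)) (fun y => y)).getD 0

-- the `while len(out) < n` loop; fuel n is enough (each pass appends one index)
def aLoop : Nat → Nat → List Int → List Int
  | 0, _, out => out
  | fuel + 1, n, out =>
    if out.length < n then
      let candidates := (PySem.List.pyRange 0 (n : Int) 1).filter (fun i => !(out.contains i))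
      let i := (PySem.List.max? candidates (aKey out)).getD 0
      aLoop fuel n (out ++ [i])
    else out

def maxdist_reorder_py (items : List Int) : List Int :=
  let n := items.length
  if n ≤ 2 then items
  else (aLoop n n [0, (n : Int) - 1]).map (fun i => PySem.List.pyGetD items i 0)
  -- every index in out lies in [0, n), so items[i] never raises

-- ===== PORT B =====
def bLoop : Nat → List Int → List Int → List Int
  | 0, _, order => order
  | k + 1, dist, order =>
    let pairs := (PySem.List.enumerate dist).filter (fun t => decide (0 < t.2))
    let j := ((PySem.List.max? pairs (fun t => t.2)).getD (0, 0)).1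
    bLoop k ((PySem.List.enumerate dist).map (fun t => min t.2 |t.1 - j|)) (order ++ [j])

def maxdist_reorder_py_alt (items : List Int) : List Int :=
  let n := items.length
  if n ≤ 2 then items
  else
    let dist := (PySem.List.pyRange 0 (n : Int) 1).map (fun i => min i ((n : Int) - 1 - i))
    (bLoop (n - 2) dist [0, (n : Int) - 1]).map (fun k => PySem.List.pyGetD items k 0)

-- ===== PRECONDITION & SPEC =====
def Spec_maxdist_reorder_py (items : List Int) (out : List Int) : Prop := out = maxdist_reorder_py_alt items
instance (items : List Int) (out : List Int) : Decidable (Spec_maxdist_reorder_py items out) := by unfold Spec_maxdist_reorder_py; infer_instance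

-- ===== CLAIM (what is proved, stated in full; the proofs are below) =====
def Claim_equal_maxdist_reorder_py : Prop := ∀ (items : List Int), Dom_maxdist_reorder_py items → Spec_maxdist_reorder_py items (maxdist_reorder_py items)

-- ===== LEMMAS AND PROOFS =====

-- enumerate of a map over an Int range pairs each range value with its image
theorem enum_map_pyRange {α : Type} (g : Int → α) :
    ∀ (k : Nat) (a b : Int), (b - a).toNat = k →
      PySem.List.enumerate ((PySem.List.pyRange a b 1).map g) a
        = (PySem.List.pyRange a b 1).map (fun c => (c, g c)) := by
  intro k
  induction k with
  | zero =>
    intro a b h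
    rw [PySem.List.pyRange_one_eq_nil (by omega)]
    simp
  | succ k ih =>
    intro a b h
    rw [PySem.List.pyRange_one_cons (by omega)]
    simp only [List.map_cons, PySem.List.enumerate_cons]
    rw [ih (a + 1) b (by omega)]

-- foldl min of mapped values is positive iff the seed and all values are
theorem pos_foldl_min (f : Int → Int) :
    ∀ (t : List Int) (a : Int),
      (0 < (t.map f).foldl min a) ↔ (0 < a ∧ ∀ o ∈ t, 0 < f o) := by
  intro t
  induction t with
  | nil => simp
  | cons h t ih =>
    intro a
    simp only [List.map_cons, List.foldl_cons, ih, lt_min_iff, List.mem_cons]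
    constructor
    · rintro ⟨⟨ha, hh⟩, hall⟩
      exact ⟨ha, fun o ho => ho.elim (fun e => e ▸ hh) (hall o)⟩
    · rintro ⟨ha, hall⟩
      exact ⟨⟨ha, hall h (Or.inl rfl)⟩, fun o ho => hall o (Or.inr ho)⟩

-- the key is positive exactly on the indices not yet chosen
theorem aKey_pos_iff (h : Int) (t : List Int) (c : Int) :
    (0 < aKey (h :: t) c) ↔ c ∉ (h :: t) := by
  unfold aKey
  rw [List.map_cons, PySem.List.min?_id_cons, Option.getD_some, pos_foldl_min]
  simp only [List.mem_cons, abs_pos, sub_ne_zero]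
  constructor
  · rintro ⟨hh, hall⟩ (rfl | hc)
    · exact hh rfl
    · exact (hall c hc) rfl
  · intro hc
    exact ⟨fun e => hc (Or.inl e), fun o ho e => hc (Or.inr (e ▸ ho))⟩

-- appending one chosen point updates the key by a single min
theorem aKey_append (h : Int) (t : List Int) (j c : Int) :
    aKey ((h :: t) ++ [j]) c = min (aKey (h :: t) c) |c - j| := by
  unfold aKey
  simp only [List.cons_append, List.map_cons, List.map_append, List.map_cons, List.map_nil,
    PySem.List.min?_id_cons, Option.getD_some, List.foldl_append, List.foldl_cons, List.foldl_nil]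

-- max? over the paired list is the pairing of max? over the originals
theorem max?_cons_cons {α κ : Type} [LT κ] [DecidableLT κ] (key : α → κ) (a b : α) (l : List α) :
    PySem.List.max? (a :: b :: l) key = PySem.List.max? ((if key a < key b then b else a) :: l) key := by
  unfold PySem.List.max?
  simp only [List.foldl_cons]
  by_cases h : key a < key b <;> simp [h]

theorem max?_pairs (k : Int → Int) :
    ∀ (l : List Int),
      PySem.List.max? (l.map (fun c => (c, k c))) (fun t => t.2)
        = (PySem.List.max? l k).map (fun c => (c, k c)) := by
  intro l
  cases l with
  | nil => rfl
  | cons a l =>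
    induction l generalizing a with
    | nil => rfl
    | cons b t ih =>
      simp only [List.map_cons]
      rw [max?_cons_cons, max?_cons_cons (key := k)]
      by_cases h : k a < k b
      · simpa [h] using ih b
      · simpa [h] using ih a

-- the two loops agree step for step once dist tabulates aKey
theorem loop_eq (n : Nat) :
    ∀ (k fuel : Nat) (out dist : List Int),
      out ≠ [] → out.length + k = n → k ≤ fuel →
      dist = (PySem.List.pyRange 0 (n : Int) 1).map (aKey out) →
      aLoop fuel n out = bLoop k dist out := by
  intro k
  induction k with
  | zero =>
    intro fuel out dist _ hlen _ _
    cases fuel with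
    | zero => rfl
    | succ f => simp [aLoop, bLoop, show ¬ out.length < n by omega]
  | succ k ih =>
    intro fuel out dist hne hlen hfuel hdist
    obtain ⟨h, t, rfl⟩ : ∃ h t, out = h :: t := by
      cases out with
      | nil => exact absurd rfl hne
      | cons h t => exact ⟨h, t, rfl⟩
    cases fuel with
    | zero => omega
    | succ f =>
      rw [aLoop, if_pos (by omega : (h :: t).length < n), bLoop]
      have henum : PySem.List.enumerate dist 0
          = (PySem.List.pyRange 0 (n : Int) 1).map (fun c => (c, aKey (h :: t) c)) := by
        rw [hdist]; exact enum_map_pyRange (aKey (h :: t)) (n : Int).toNat 0 n (by simp)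
      have hfilter : (PySem.List.enumerate dist).filter (fun tp => decide (0 < tp.2))
          = ((PySem.List.pyRange 0 (n : Int) 1).filter (fun i => !((h :: t).contains i))).map
              (fun c => (c, aKey (h :: t) c)) := by
        rw [henum, List.filter_map]
        congr 1
        apply List.filter_congr
        intro c _
        simp [Function.comp_apply, aKey_pos_iff]
      have hpick :
          ((PySem.List.max? ((PySem.List.enumerate dist).filter (fun tp => decide (0 < tp.2)))
              (fun tp => tp.2)).getD (0, 0)).1
          = (PySem.List.max? ((PySem.List.pyRange 0 (n : Int) 1).filter
              (fun i => !((h :: t).contains i))) (aKey (h :: t))).getD 0 := by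
        rw [hfilter, max?_pairs]
        cases PySem.List.max? ((PySem.List.pyRange 0 (n : Int) 1).filter
          (fun i => !((h :: t).contains i))) (aKey (h :: t)) <;> rfl
      rw [hpick]
      set i := (PySem.List.max? ((PySem.List.pyRange 0 (n : Int) 1).filter
        (fun i => !((h :: t).contains i))) (aKey (h :: t))).getD 0 with hi
      apply ih f ((h :: t) ++ [i]) _ (by simp) (by simp at hlen ⊢; omega) (by omega)
      rw [henum, List.map_map]
      apply List.map_congr_left
      intro c _
      simp only [Function.comp_apply]
      exact (aKey_append h t i c).symm

-- the initial comprehension tabulates aKey of the two endpoints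
theorem init_dist (n : Nat) :
    (PySem.List.pyRange 0 (n : Int) 1).map (fun i => min i ((n : Int) - 1 - i))
      = (PySem.List.pyRange 0 (n : Int) 1).map (aKey [0, (n : Int) - 1]) := by
  apply List.map_congr_left
  intro c hc
  rw [PySem.List.mem_pyRange_one] at hc
  unfold aKey
  rw [List.map_cons, List.map_cons, List.map_nil, PySem.List.min?_id_cons, Option.getD_some]
  simp only [List.foldl_cons, List.foldl_nil, sub_zero]
  rw [abs_of_nonneg hc.1, abs_of_nonpos (by omega)]
  omega

-- ===== VERDICT (by name: the statement is the Claim_ definition above) =====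
theorem maxdist_reorder_py_spec : Claim_equal_maxdist_reorder_py := by
  intro items _
  unfold Spec_maxdist_reorder_py maxdist_reorder_py maxdist_reorder_py_alt
  by_cases hn : items.length ≤ 2
  · simp [hn]
  · simp only [hn, if_false]
    rw [init_dist items.length,
      loop_eq items.length (items.length - 2) items.length [0, (items.length : Int) - 1]
        _ (by simp) (by simp; omega) (by omega) rfl]
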